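-- pv_equiv track=rewrite | github.com/jenarvaezg/aoc2025 | day06.py | process_vertical_block
-- ===== SOURCE A (Python) =====
-- def process_vertical_block(col_indices, grid):
--     numbers = []
--     operator = None
--
--     # Buscar el operador en el bloque (generalmente en las últimas filas)
--     # y extraer números columna por columna
--
--     # 1. Identificar Operador
--     for x in col_indices:
--         for row in grid:
--             char = row[x]
--             if char in '+*':
--                 operator = char
--                 break
--         if operator: break
--
--     # Si no hay operador, asumimos suma (o ignoramos, según la robustez necesaria)
--     if not operator: return 0
--
--     # 2. Extraer Números Verticales
--     for x in col_indices:
--         digits = []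
--         for row in grid:
--             char = row[x]
--             if char.isdigit():
--                 digits.append(char)
--
--         if digits:
--             # Unimos los dígitos de arriba a abajo para formar el número
--             number = int("".join(digits))
--             numbers.append(number)
--
--     if not numbers: return 0
--
--     # 3. Calcular
--     result = numbers[0]
--     for num in numbers[1:]:
--         if operator == '+':
--             result += num
--         elif operator == '*':
--             result *= num
--
--     return result
-- ===== SOURCE B (Python) =====
-- def process_vertical_block(col_indices, grid):
--     # Single pass over the columns: each column scan records the first-seen
--     # operator (column-major, never overwritten) and builds the digit string.
--     operator = None
--     numbers = []
--     for x in col_indices: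
--         digits = ""
--         for row in grid:
--             c = row[x]
--             if operator is None and c in "+*":
--                 operator = c
--             if c.isdigit():
--                 digits += c
--         if digits:
--             numbers.append(int(digits))
--     if operator is None or not numbers:
--         return 0
--     if operator == "+":
--         return sum(numbers)
--     result = 1
--     for n in numbers:
--         result *= n
--     return result
-- ===== Notes on version B (the rewrite author's own statement) =====
-- stated objective: alternative
-- what changed: Replaces A's three separate column passes (break-out operator search, then number extraction, then an explicit seed-and-fold accumulator) by one fused column-major pass that records the first operator and the digits together, finishing with sum/product library-style aggregation of the whole list.
import Mathlib
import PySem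

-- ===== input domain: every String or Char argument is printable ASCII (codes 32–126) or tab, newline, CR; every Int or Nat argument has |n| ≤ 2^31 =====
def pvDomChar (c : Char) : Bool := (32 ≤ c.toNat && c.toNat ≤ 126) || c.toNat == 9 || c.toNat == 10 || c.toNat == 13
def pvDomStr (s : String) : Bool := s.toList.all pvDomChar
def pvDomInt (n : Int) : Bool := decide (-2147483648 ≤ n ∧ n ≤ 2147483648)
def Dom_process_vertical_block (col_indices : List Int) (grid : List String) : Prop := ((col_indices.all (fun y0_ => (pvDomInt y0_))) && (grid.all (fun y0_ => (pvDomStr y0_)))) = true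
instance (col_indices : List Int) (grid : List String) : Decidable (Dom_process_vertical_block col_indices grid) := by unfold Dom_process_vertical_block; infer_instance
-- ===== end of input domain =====

-- B fuses A's separate operator-search and number-extraction column passes into one
-- column-major scan and aggregates with sum/product instead of A's seeded fold (objective: alternative).

-- ===== PORT A =====
-- inner loop of step 1 for one column x (break on first '+'/'*'); outer none = IndexError
def pvA_rowOp (x : Int) (grid : List String) : Option (Option Char) :=
  match grid with
  | [] => some none
  | row :: rest =>
    match PySem.Str.pyGet? row x with
    | none => none
    | some c => if c = '+' || c = '*' then some (some c) else pvA_rowOp x rest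

-- step 1: column-major operator search with the two breaks
def pvA_findOp (cols : List Int) (grid : List String) : Option (Option Char) :=
  match cols with
  | [] => some none
  | x :: xs =>
    match pvA_rowOp x grid with
    | none => none
    | some (some c) => some (some c)
    | some none => pvA_findOp xs grid

-- step 2 inner loop: the digits of column x, top to bottom
def pvA_colDigits (x : Int) (grid : List String) : Option (List Char) :=
  match grid with
  | [] => some []
  | row :: rest =>
    match PySem.Str.pyGet? row x with
    | none => none
    | some c =>
      match pvA_colDigits x rest with
      | none => none
      | some ds => some (if PySem.Chars.isdigit c then c :: ds else ds)

-- step 2 outer loop; int("".join(digits)) is ofChars?, always `some` since digits is a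
-- nonempty run of '0'..'9' there, so getD 0 is exact
def pvA_numbers (cols : List Int) (grid : List String) : Option (List Int) :=
  match cols with
  | [] => some []
  | x :: xs =>
    match pvA_colDigits x grid with
    | none => none
    | some ds =>
      match pvA_numbers xs grid with
      | none => none
      | some ns => some (if ds.isEmpty then ns else ((PySem.Int.ofChars? ds).getD 0) :: ns)

-- step 3: the explicit accumulator fold over numbers[1:]
def pvA_fold (op : Char) (r : Int) (rest : List Int) : Int :=
  match rest with
  | [] => r
  | n :: ns => pvA_fold op (if op = '+' then r + n else if op = '*' then r * n else r) ns

def process_vertical_block (col_indices : List Int) (grid : List String) : Int :=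
  match pvA_findOp col_indices grid with
  | none => 0        -- IndexError; outside Pre_
  | some none => 0
  | some (some op) =>
    match pvA_numbers col_indices grid with
    | none => 0      -- IndexError; outside Pre_
    | some [] => 0
    | some (n :: ns) => pvA_fold op n ns

-- ===== PORT B =====
-- one scan of column x: update the never-overwritten operator and collect the digits
def pvB_col (x : Int) (grid : List String) (op : Option Char) : Option (Option Char × List Char) :=
  match grid with
  | [] => some (op, [])
  | row :: rest =>
    match PySem.Str.pyGet? row x with
    | none => none
    | some c =>
      match pvB_col x rest (if op.isNone && (c = '+' || c = '*') then some c else op) with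
      | none => none
      | some (opf, ds) => some (opf, if PySem.Chars.isdigit c then c :: ds else ds)

-- the single pass over the columns, threading (operator, numbers)
def pvB_pass (cols : List Int) (grid : List String) (op : Option Char) (nums : List Int) :
    Option (Option Char × List Int) :=
  match cols with
  | [] => some (op, nums)
  | x :: xs =>
    match pvB_col x grid op with
    | none => none
    | some (op', ds) =>
      pvB_pass xs grid op' (if ds.isEmpty then nums else nums ++ [(PySem.Int.ofChars? ds).getD 0])

def process_vertical_block_alt (col_indices : List Int) (grid : List String) : Int :=
  match pvB_pass col_indices grid none [] with
  | none => 0        -- IndexError; outside Pre_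
  | some (none, _) => 0
  | some (some _, []) => 0
  | some (some op, nums) => if op = '+' then nums.sum else nums.foldl (· * ·) 1

-- ===== PRECONDITION & SPEC =====
-- A raises IndexError iff some column index is out of Python range for some row; exactly those inputs are excluded.
def Pre_process_vertical_block (col_indices : List Int) (grid : List String) : Prop :=
  ∀ x ∈ col_indices, ∀ row ∈ grid, PySem.Raise.InRange row.toList.length x
instance (col_indices : List Int) (grid : List String) : Decidable (Pre_process_vertical_block col_indices grid) := by
  unfold Pre_process_vertical_block; infer_instance
def pvWitness_process_vertical_block : List Int × List String := ([0, 1], ["1+", "2 "])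

def Spec_process_vertical_block (col_indices : List Int) (grid : List String) (out : Int) : Prop := out = process_vertical_block_alt col_indices grid
instance (col_indices : List Int) (grid : List String) (out : Int) : Decidable (Spec_process_vertical_block col_indices grid out) := by unfold Spec_process_vertical_block; infer_instance

-- ===== CLAIM (what is proved, stated in full; the proofs are below) =====
def Claim_equal_process_vertical_block : Prop := ∀ (col_indices : List Int) (grid : List String), Dom_process_vertical_block col_indices grid → Pre_process_vertical_block col_indices grid → Spec_process_vertical_block col_indices grid (process_vertical_block col_indices grid)

-- ===== LEMMAS AND PROOFS =====

-- One column: under in-range accesses, A's digit scan succeeds, A's operator scan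
-- succeeds with an operator character, and B's fused scan returns exactly both.
theorem pv_col_lemma (x : Int) (grid : List String)
    (h : ∀ row ∈ grid, PySem.Raise.InRange row.toList.length x) :
    ∃ ds o, pvA_colDigits x grid = some ds ∧ pvA_rowOp x grid = some o ∧
      (∀ c, o = some c → (c = '+' ∨ c = '*')) ∧
      (∀ c, pvB_col x grid (some c) = some (some c, ds)) ∧
      pvB_col x grid none = some (o, ds) := by
  induction grid with
  | nil => exact ⟨[], none, rfl, rfl, by simp, by simp [pvB_col], by simp [pvB_col]⟩
  | cons row rest ih =>
    obtain ⟨c0, hc0⟩ : ∃ c0, PySem.Str.pyGet? row x = some c0 := by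
      have hin := h row (by simp)
      rcases hg : PySem.Str.pyGet? row x with _ | c
      · rw [PySem.Str.pyGet?_eq, PySem.Chars.pyGet?_eq_listPyGet?, PySem.List.pyGet?_eq_none_iff] at hg
        exact absurd hin hg
      · exact ⟨c, rfl⟩
    have hc0' : PySem.List.pyGet? row.toList x = some c0 := by
      rw [← PySem.Chars.pyGet?_eq_listPyGet?, ← PySem.Str.pyGet?_eq]; exact hc0
    obtain ⟨ds', o', hds', ho', hop', hBc', hBn'⟩ := ih (fun r hr => h r (by simp [hr]))
    by_cases hc : c0 = '+' ∨ c0 = '*'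
    · refine ⟨if PySem.Chars.isdigit c0 then c0 :: ds' else ds', some c0, ?_, ?_, ?_, ?_, ?_⟩
      · simp [pvA_colDigits, hc0', hds']
      · rcases hc with hc | hc <;> simp [pvA_rowOp, hc0', hc]
      · intro c hcc; cases hcc; exact hc
      · intro c; simp [pvB_col, hc0', hBc' c]
      · have hb : (c0 = '+' || c0 = '*') = true := by rcases hc with hc | hc <;> simp [hc]
        simp [pvB_col, hc0', hb, hBc' c0]
    · have hc1 : ¬ c0 = '+' := fun h1 => hc (Or.inl h1)
      have hc2 : ¬ c0 = '*' := fun h2 => hc (Or.inr h2)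
      refine ⟨if PySem.Chars.isdigit c0 then c0 :: ds' else ds', o', ?_, ?_, hop', ?_, ?_⟩
      · simp [pvA_colDigits, hc0', hds']
      · simp [pvA_rowOp, hc0', hc1, hc2, ho']
      · intro c; simp [pvB_col, hc0', hBc' c]
      · simp [pvB_col, hc0', hc1, hc2, hBn']
  
theorem pv_outer_lemma (grid : List String) (cols : List Int)
    (h : ∀ x ∈ cols, ∀ row ∈ grid, PySem.Raise.InRange row.toList.length x) :
    ∃ numsA o, pvA_numbers cols grid = some numsA ∧ pvA_findOp cols grid = some o ∧
      (∀ c, o = some c → (c = '+' ∨ c = '*')) ∧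
      (∀ c nums, pvB_pass cols grid (some c) nums = some (some c, nums ++ numsA)) ∧
      (∀ nums, pvB_pass cols grid none nums = some (o, nums ++ numsA)) := by
  induction cols with
  | nil => exact ⟨[], none, rfl, rfl, by simp, by simp [pvB_pass], by simp [pvB_pass]⟩
  | cons x xs ih =>
    obtain ⟨numsA', o', hnum', hfind', hop', hBc', hBn'⟩ := ih (fun y hy => h y (by simp [hy]))
    obtain ⟨ds, o₁, hds, ho₁, hop₁, hcolc, hcoln⟩ := pv_col_lemma x grid (h x (by simp))
    refine ⟨if ds.isEmpty then numsA' else ((PySem.Int.ofChars? ds).getD 0) :: numsA',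
      o₁.orElse (fun _ => o'), ?_, ?_, ?_, ?_, ?_⟩
    · simp [pvA_numbers, hds, hnum']
    · cases o₁ with
      | none => simp [pvA_findOp, ho₁, hfind', Option.orElse]
      | some c => simp [pvA_findOp, ho₁, Option.orElse]
    · cases o₁ with
      | none => simpa [Option.orElse] using hop'
      | some c => intro c' h'; simp [Option.orElse] at h'; subst h'; exact hop₁ c rfl
    · intro c nums
      by_cases hde : ds.isEmpty <;>
        simp [pvB_pass, hcolc c, hde, hBc', List.append_assoc]
    · intro nums
      cases o₁ with
      | none =>
        by_cases hde : ds.isEmpty <;>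
          simp [pvB_pass, hcoln, hde, hBn', Option.orElse, List.append_assoc]
      | some c =>
        by_cases hde : ds.isEmpty <;>
          simp [pvB_pass, hcoln, hde, hBc', Option.orElse, List.append_assoc]

theorem pvA_fold_add (r : Int) (ns : List Int) : pvA_fold '+' r ns = r + ns.sum := by
  induction ns generalizing r with
  | nil => simp [pvA_fold]
  | cons n ns ih => simp [pvA_fold, ih]; ring

theorem pvA_fold_mul (r : Int) (ns : List Int) : pvA_fold '*' r ns = ns.foldl (· * ·) r := by
  induction ns generalizing r with
  | nil => rfl
  | cons n ns ih => simp [pvA_fold, List.foldl, ih]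

-- ===== VERDICT (by name: the statement is the Claim_ definition above) =====
theorem process_vertical_block_spec : Claim_equal_process_vertical_block := by
  intro cols grid _ hpre
  unfold Spec_process_vertical_block process_vertical_block process_vertical_block_alt
  obtain ⟨numsA, o, hnum, hfind, hop, _, hpass⟩ := pv_outer_lemma grid cols hpre
  rw [hnum, hfind, hpass]
  match o with
  | none => rfl
  | some c =>
    rcases hop c rfl with hc | hc <;> subst hc <;>
      match numsA with
      | [] => rfl
      | n :: ns => simp [pvA_fold_add, pvA_fold_mul, List.sum_cons]
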